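-- pv_equiv track=rewrite | github.com/maxpt95/excercism-python-track | excercises/pig_latin.py | find_separator
-- ===== SOURCE A (Python) =====
-- VOWELS = "a", "i", "e", "o", "u"
--
-- def find_separator(text: str) -> int:
--     """Find the first partition separator"""
--     i_min = len(text) - 1
--     separators = VOWELS + ("qu", "y")
--
--     for s in separators:
--         i = text.find(s)
--         if i == 0 and s == "y":
--             continue
--         if i != -1 and i <= i_min:
--             i_min = i
--             separator = s
--
--     return separator
-- ===== SOURCE B (Python) =====
-- VOWELS = "a", "i", "e", "o", "u"
--
-- def find_separator(text: str) -> int: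
--     """Find the first partition separator by one left-to-right scan."""
--     consider_y = text.find('y') != 0
--     for i in range(len(text)):
--         ch = text[i]
--         if ch in VOWELS:
--             return ch
--         if text[i:i + 2] == 'qu':
--             return 'qu'
--         if ch == 'y' and consider_y:
--             return 'y'
-- ===== Notes on version B (the rewrite author's own statement) =====
-- stated objective: simpler
-- what changed: Replaces A's seven separate str.find scans plus running index/separator minimisation with one left-to-right scan that returns the first vowel, 'qu' or (unless the text starts with 'y') 'y' it meets.
import Mathlib
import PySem

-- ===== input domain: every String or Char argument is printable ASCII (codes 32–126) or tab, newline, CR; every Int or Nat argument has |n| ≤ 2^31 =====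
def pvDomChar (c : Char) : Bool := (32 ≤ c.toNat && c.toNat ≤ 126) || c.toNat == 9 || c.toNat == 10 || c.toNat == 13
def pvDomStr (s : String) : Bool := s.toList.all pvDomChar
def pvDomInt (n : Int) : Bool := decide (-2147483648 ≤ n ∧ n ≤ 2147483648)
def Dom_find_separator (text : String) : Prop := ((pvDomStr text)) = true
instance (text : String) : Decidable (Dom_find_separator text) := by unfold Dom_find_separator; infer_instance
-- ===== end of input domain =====

-- B replaces A's seven separate str.find scans by one left-to-right scan of the text (simpler, single pass).

-- ===== PORT A =====
def pvVowels : List String := ["a", "i", "e", "o", "u"]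

-- one iteration of A's 'for s in separators' loop; state = (i_min, separator)
def pvStepA (text : String) (st : Int × Option String) (s : String) : Int × Option String :=
  let i := PySem.Str.find text s
  if i = 0 ∧ s = "y" then st
  else if i ≠ -1 ∧ i ≤ st.1 then (i, some s) else st

def find_separator (text : String) : String :=
  let i_min : Int := PySem.Str.len text - 1
  let separators := pvVowels ++ ["qu", "y"]
  -- 'none' = Python's UnboundLocalError (separator never assigned); excluded by Pre_
  ((separators.foldl (pvStepA text) (i_min, none)).2).getD ""

-- ===== PORT B =====
-- the 'for i in range(len(text))' scan of Source B, as structural recursion on the char list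
def pvScan (considerY : Bool) : List Char → Option String
  | [] => none
  | c :: rest =>
    if c ∈ (['a', 'i', 'e', 'o', 'u'] : List Char) then some (String.ofList [c])
    else if c = 'q' ∧ rest.head? = some 'u' then some "qu"  -- text[i:i+2] == 'qu'
    else if c = 'y' ∧ considerY then some "y"
    else pvScan considerY rest

def find_separator_alt (text : String) : String :=
  let considerY : Bool := PySem.Str.find text "y" != 0
  -- 'none' = Python B's falling off the loop (returns None); excluded by Pre_
  ((pvScan considerY text.toList).getD "")

-- ===== PRECONDITION & SPEC =====
-- Pre_ excludes exactly the inputs containing no separator at all (no vowel, no "qu",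
-- and no 'y' except a first occurrence at index 0): there Python A raises
-- UnboundLocalError (its 'separator' variable is never assigned).
def Pre_find_separator (text : String) : Prop :=
  (text.toList.any fun c => c ∈ (['a', 'i', 'e', 'o', 'u'] : List Char)) = true ∨
  ['q', 'u'] <:+: text.toList ∨
  ('y' ∈ text.toList ∧ text.toList.head? ≠ some 'y')
instance (text : String) : Decidable (Pre_find_separator text) := by unfold Pre_find_separator; infer_instance

def pvWitness_find_separator : String := "xquy"

def Spec_find_separator (text : String) (out : String) : Prop := out = find_separator_alt text
instance (text : String) (out : String) : Decidable (Spec_find_separator text out) := by unfold Spec_find_separator; infer_instance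

-- ===== CLAIM (what is proved, stated in full; the proofs are below) =====
def Claim_equal_find_separator : Prop := ∀ (text : String), Dom_find_separator text → Pre_find_separator text → Spec_find_separator text (find_separator text)

-- ===== LEMMAS AND PROOFS =====

theorem pvScan_cons (cy : Bool) (c : Char) (rest : List Char) :
    pvScan cy (c :: rest) =
      (if c ∈ (['a', 'i', 'e', 'o', 'u'] : List Char) then some (String.ofList [c])
       else if c = 'q' ∧ rest.head? = some 'u' then some "qu"
       else if c = 'y' ∧ cy then some "y"
       else pvScan cy rest) := rfl

-- A's loop step with the y-skip test ('text.find("y") == 0') replaced by an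
-- abstract index function F and a precomputed flag cy = (find("y") != 0).
def pvGStep (F : String → Int) (cy : Bool) (st : Int × Option String) (s : String) : Int × Option String :=
  if cy = false ∧ s = "y" then st
  else if F s ≠ -1 ∧ F s ≤ st.1 then (F s, some s) else st

theorem pvStepA_eq_gstep (text : String) :
    pvStepA text = pvGStep (fun s => PySem.Str.find text s) (PySem.Str.find text "y" != 0) := by
  funext st s
  unfold pvStepA pvGStep
  by_cases hs : s = "y"
  · subst hs; simp [bne]
  · simp [hs]

theorem pv_find_zero_iff (cs p : List Char) : PySem.Chars.find cs p = 0 ↔ p <+: cs := by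
  constructor
  · intro h
    have h0 : 0 ≤ PySem.Chars.find cs p := by omega
    have hsp := (PySem.Chars.find_spec h0).1
    rw [h] at hsp; simpa using hsp
  · intro hp
    have h0 : 0 ≤ PySem.Chars.find cs p := (PySem.Chars.find_nonneg_iff cs p).mpr hp.isInfix
    by_contra hne
    have h1 : 0 < (PySem.Chars.find cs p).toNat := by omega
    exact (PySem.Chars.find_spec h0).2 0 h1 (by simpa using hp)

theorem pv_find_shift (c : Char) (rest p : List Char) (hp : ¬ p <+: (c :: rest)) :
    (PySem.Chars.find rest p = -1 ∧ PySem.Chars.find (c :: rest) p = -1) ∨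
    (0 ≤ PySem.Chars.find rest p ∧
      PySem.Chars.find (c :: rest) p = PySem.Chars.find rest p + 1) := by
  by_cases hr : PySem.Chars.find rest p = -1
  · left
    refine ⟨hr, (PySem.Chars.find_eq_neg_one_iff _ _).mpr ?_⟩
    intro hinf
    rcases List.infix_cons_iff.mp hinf with h | h
    · exact hp h
    · exact (PySem.Chars.find_eq_neg_one_iff _ _).mp hr h
  · right
    have hk0 : 0 ≤ PySem.Chars.find rest p := by
      have := PySem.Chars.neg_one_le_find rest p; omega
    obtain ⟨hkpre, hkmin⟩ := PySem.Chars.find_spec hk0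
    set k : Nat := (PySem.Chars.find rest p).toNat with hkdef
    -- p occurs in c :: rest (at k+1), so find is some index m ≥ 0
    have hinf : p <:+: (c :: rest) :=
      List.infix_cons_iff.mpr (Or.inr (hkpre.isInfix.trans (List.drop_suffix k rest).isInfix))
    have hm0 : 0 ≤ PySem.Chars.find (c :: rest) p := (PySem.Chars.find_nonneg_iff _ _).mpr hinf
    obtain ⟨hmpre, hmmin⟩ := PySem.Chars.find_spec hm0
    set m : Nat := (PySem.Chars.find (c :: rest) p).toNat with hmdef
    have hmne : PySem.Chars.find (c :: rest) p ≠ 0 := fun h => hp ((pv_find_zero_iff _ _).mp h)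
    have hm1 : 1 ≤ m := by omega
    have hdrop : ∀ n : Nat, 1 ≤ n → List.drop n (c :: rest) = List.drop (n - 1) rest := by
      intro n hn
      cases n with
      | zero => omega
      | succ n' => simp
    -- m ≤ k + 1 : p is a prefix of (c :: rest).drop (k+1) = rest.drop k
    have hup : m ≤ k + 1 := by
      by_contra hlt
      exact hmmin (k + 1) (by omega) (by simpa using hkpre)
    -- k + 1 ≤ m : p is a prefix of rest.drop (m-1)
    have hlow : k + 1 ≤ m := by
      have hpre' : p <+: rest.drop (m - 1) := by
        rw [← hdrop m hm1]; exact hmpre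
      by_contra hlt
      exact hkmin (m - 1) (by omega) hpre'
    exact ⟨hk0, by omega⟩

theorem pv_fold_nonneg (F : String → Int) (cy : Bool) (hF : ∀ s, -1 ≤ F s) :
    ∀ (L : List String) (st : Int × Option String), 0 ≤ st.1 →
      0 ≤ (L.foldl (pvGStep F cy) st).1 := by
  intro L
  induction L with
  | nil => intro st hst; simpa using hst
  | cons s L ih =>
    intro st hst
    rw [List.foldl_cons]
    refine ih _ ?_
    unfold pvGStep
    split_ifs with _ h2
    · exact hst
    · have h3 := hF s; simp; omega
    · exact hst

theorem pv_fold_stay (F : String → Int) (cy : Bool) (hF : ∀ s, -1 ≤ F s) :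
    ∀ (L : List String) (v : Option String), (∀ s ∈ L, F s ≠ 0) →
      L.foldl (pvGStep F cy) (0, v) = (0, v) := by
  intro L
  induction L with
  | nil => intro v _; rfl
  | cons s L ih =>
    intro v h
    rw [List.foldl_cons]
    have hstep : pvGStep F cy (0, v) s = (0, v) := by
      unfold pvGStep
      split_ifs with _ h2
      · rfl
      · exfalso; have h3 := hF s; have h4 := h s (by simp); omega
      · rfl
    rw [hstep]
    exact ih v (fun t ht => h t (by simp [ht]))

theorem pv_fold_pick (F : String → Int) (cy : Bool) (L1 L2 : List String) (s0 : String)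
    (hF : ∀ s, -1 ≤ F s) (h2 : ∀ s ∈ L2, F s ≠ 0)
    (h0 : F s0 = 0) (hskip : ¬(cy = false ∧ s0 = "y"))
    (st : Int × Option String) (hst : 0 ≤ st.1) :
    ((L1 ++ s0 :: L2).foldl (pvGStep F cy) st).2 = some s0 := by
  rw [List.foldl_append, List.foldl_cons]
  have hnn : 0 ≤ (L1.foldl (pvGStep F cy) st).1 := pv_fold_nonneg F cy hF L1 st hst
  have hstep : ∀ st' : Int × Option String, 0 ≤ st'.1 → pvGStep F cy st' s0 = (0, some s0) := by
    intro st' hst'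
    unfold pvGStep
    rw [if_neg hskip, if_pos ⟨by omega, by omega⟩, h0]
  rw [hstep _ hnn, pv_fold_stay F cy hF L2 (some s0) h2]

theorem pv_fold_shift (F G : String → Int) (cy : Bool) :
    ∀ (L : List String),
      (∀ s ∈ L, (cy = false ∧ s = "y") ∨ (G s = -1 ∧ F s = -1) ∨ (0 ≤ G s ∧ F s = G s + 1)) →
      ∀ st : Int × Option String,
        L.foldl (pvGStep F cy) (st.1 + 1, st.2) =
          ((L.foldl (pvGStep G cy) st).1 + 1, (L.foldl (pvGStep G cy) st).2) := by
  intro L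
  induction L with
  | nil => intro _ st; rfl
  | cons s L ih =>
    intro h st
    rw [List.foldl_cons, List.foldl_cons]
    have hstep : pvGStep F cy (st.1 + 1, st.2) s =
        ((pvGStep G cy st s).1 + 1, (pvGStep G cy st s).2) := by
      unfold pvGStep
      rcases h s (by simp) with hs | ⟨hg, hf⟩ | ⟨hg, hf⟩
      · rw [if_pos hs, if_pos hs]
      · by_cases hsk : cy = false ∧ s = "y"
        · rw [if_pos hsk, if_pos hsk]
        · rw [if_neg hsk, if_neg hsk, if_neg (by simp [hf]), if_neg (by simp [hg])]
      · by_cases hsk : cy = false ∧ s = "y"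
        · rw [if_pos hsk, if_pos hsk]
        · rw [if_neg hsk, if_neg hsk]
          by_cases hle : G s ≤ st.1
          · rw [if_pos ⟨by omega, by omega⟩, if_pos ⟨by omega, hle⟩, hf]
          · rw [if_neg (by omega), if_neg (by omega)]
    rw [hstep]
    exact ih (fun t ht => h t (by simp [ht])) (pvGStep G cy st s)

-- the central lemma: over the same char list, A's generalized fold over the seven
-- separators computes exactly B's single scan
theorem pv_main (cs : List Char) : ∀ cy : Bool,
    ((pvVowels ++ ["qu", "y"]).foldl
        (pvGStep (fun s => PySem.Chars.find cs s.toList) cy)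
        ((cs.length : Int) - 1, none)).2
      = pvScan cy cs := by
  induction cs with
  | nil => intro cy; cases cy <;> decide
  | cons c rest ih =>
    intro cy
    have hF : ∀ s : String, -1 ≤ PySem.Chars.find (c :: rest) s.toList :=
      fun s => PySem.Chars.neg_one_le_find _ _
    have hlen : ((c :: rest).length : Int) - 1 = ((rest.length : Int) - 1) + 1 := by
      rw [List.length_cons]; push_cast; ring
    have hnn : (0 : Int) ≤ ((c :: rest).length : Int) - 1 := by simp
    have hz : ∀ (x : Char) (xs : List Char), x ≠ c →
        PySem.Chars.find (c :: rest) (x :: xs) ≠ 0 := by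
      intro x xs hx h
      have hpre := (pv_find_zero_iff _ _).mp h
      rw [List.cons_prefix_cons] at hpre
      exact hx hpre.1
    by_cases hv : c ∈ (['a', 'i', 'e', 'o', 'u'] : List Char)
    · -- a vowel matches at index 0, everything else has find ≠ 0
      have hscan : pvScan cy (c :: rest) = some (String.ofList [c]) := by
        rw [pvScan_cons, if_pos hv]
      rw [hscan]
      fin_cases hv
      · exact pv_fold_pick _ cy [] ["i", "e", "o", "u", "qu", "y"] "a" hF
          (by intro s hs; fin_cases hs <;> exact hz _ _ (by decide))
          ((pv_find_zero_iff _ _).mpr (by simp)) (by simp) _ hnn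
      · exact pv_fold_pick _ cy ["a"] ["e", "o", "u", "qu", "y"] "i" hF
          (by intro s hs; fin_cases hs <;> exact hz _ _ (by decide))
          ((pv_find_zero_iff _ _).mpr (by simp)) (by simp) _ hnn
      · exact pv_fold_pick _ cy ["a", "i"] ["o", "u", "qu", "y"] "e" hF
          (by intro s hs; fin_cases hs <;> exact hz _ _ (by decide))
          ((pv_find_zero_iff _ _).mpr (by simp)) (by simp) _ hnn
      · exact pv_fold_pick _ cy ["a", "i", "e"] ["u", "qu", "y"] "o" hF
          (by intro s hs; fin_cases hs <;> exact hz _ _ (by decide))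
          ((pv_find_zero_iff _ _).mpr (by simp)) (by simp) _ hnn
      · exact pv_fold_pick _ cy ["a", "i", "e", "o"] ["qu", "y"] "u" hF
          (by intro s hs; fin_cases hs <;> exact hz _ _ (by decide))
          ((pv_find_zero_iff _ _).mpr (by simp)) (by simp) _ hnn
    · by_cases hq : c = 'q' ∧ rest.head? = some 'u'
      · obtain ⟨rfl, hu⟩ := hq
        have hscan : pvScan cy ('q' :: rest) = some "qu" := by
          rw [pvScan_cons, if_neg hv, if_pos ⟨rfl, hu⟩]
        rw [hscan]
        have h0 : PySem.Chars.find ('q' :: rest) ['q', 'u'] = 0 := by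
          apply (pv_find_zero_iff _ _).mpr
          rw [List.cons_prefix_cons]
          refine ⟨rfl, ?_⟩
          cases rest with
          | nil => simp at hu
          | cons r rs => simp at hu; simp [hu, List.cons_prefix_cons]
        refine pv_fold_pick _ cy ["a", "i", "e", "o", "u"] ["y"] "qu" hF
          ?_ h0 (by simp) _ hnn
        intro s hs; fin_cases hs; exact hz _ _ (by decide)
      · by_cases hy : c = 'y' ∧ cy = true
        · obtain ⟨rfl, rfl⟩ := hy
          have hscan : pvScan true ('y' :: rest) = some "y" := by
            rw [pvScan_cons, if_neg hv, if_neg hq, if_pos ⟨rfl, rfl⟩]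
          rw [hscan]
          have h0 : PySem.Chars.find ('y' :: rest) ['y'] = 0 := by
            apply (pv_find_zero_iff _ _).mpr; simp [List.cons_prefix_cons]
          exact pv_fold_pick _ true ["a", "i", "e", "o", "u", "qu"] [] "y" hF
            (by simp) h0 (by simp) _ hnn
        · -- no separator starts at this character: shift everything by one
          have hnp : ∀ s ∈ (pvVowels ++ ["qu", "y"]),
              (cy = false ∧ s = "y") ∨
              (PySem.Chars.find rest s.toList = -1 ∧ PySem.Chars.find (c :: rest) s.toList = -1) ∨
              (0 ≤ PySem.Chars.find rest s.toList ∧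
                PySem.Chars.find (c :: rest) s.toList = PySem.Chars.find rest s.toList + 1) := by
            intro s hs
            fin_cases hs
            · exact Or.inr (pv_find_shift c rest _ (by
                intro h
                replace h : (['a'] : List Char) <+: c :: rest := h
                rw [List.cons_prefix_cons] at h; exact hv (by simp [← h.1])))
            · exact Or.inr (pv_find_shift c rest _ (by
                intro h
                replace h : (['i'] : List Char) <+: c :: rest := h
                rw [List.cons_prefix_cons] at h; exact hv (by simp [← h.1])))
            · exact Or.inr (pv_find_shift c rest _ (by
                intro h
                replace h : (['e'] : List Char) <+: c :: rest := h
                rw [List.cons_prefix_cons] at h; exact hv (by simp [← h.1])))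
            · exact Or.inr (pv_find_shift c rest _ (by
                intro h
                replace h : (['o'] : List Char) <+: c :: rest := h
                rw [List.cons_prefix_cons] at h; exact hv (by simp [← h.1])))
            · exact Or.inr (pv_find_shift c rest _ (by
                intro h
                replace h : (['u'] : List Char) <+: c :: rest := h
                rw [List.cons_prefix_cons] at h; exact hv (by simp [← h.1])))
            · exact Or.inr (pv_find_shift c rest _ (by
                intro h
                replace h : (['q', 'u'] : List Char) <+: c :: rest := h
                rw [List.cons_prefix_cons] at h
                refine hq ⟨h.1.symm, ?_⟩
                rcases h.2 with ⟨t, ht⟩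
                cases rest with
                | nil => simp at ht
                | cons r rs => simp at ht ⊢; simp [← ht.1]))
            · by_cases hcy : cy = true
              · refine Or.inr (pv_find_shift c rest _ (by
                  intro h
                  replace h : (['y'] : List Char) <+: c :: rest := h
                  rw [List.cons_prefix_cons] at h
                  exact hy ⟨h.1.symm, hcy⟩))
              · exact Or.inl ⟨by simpa using hcy, rfl⟩
          have hscan : pvScan cy (c :: rest) = pvScan cy rest := by
            rw [pvScan_cons, if_neg hv, if_neg hq, if_neg (by simpa using hy)]
          rw [hscan, hlen]
          have hsh := pv_fold_shift (fun s => PySem.Chars.find (c :: rest) s.toList)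
            (fun s => PySem.Chars.find rest s.toList) cy (pvVowels ++ ["qu", "y"]) hnp
            (((rest.length : Int) - 1), none)
          simp only at hsh
          rw [hsh]
          exact ih cy

-- ===== VERDICT (by name: the statement is the Claim_ definition above) =====
theorem find_separator_spec : Claim_equal_find_separator := by
  intro text _ _
  show find_separator text = find_separator_alt text
  have hfun : (fun s => PySem.Str.find text s) =
      (fun s => PySem.Chars.find text.toList s.toList) := by
    funext s; rw [PySem.Str.find_eq]
  have hcy : (PySem.Str.find text "y" != 0) =
      (PySem.Chars.find text.toList ['y'] != 0) := by
    rw [PySem.Str.find_eq]; rfl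
  have hlen : PySem.Str.len text = (text.toList.length : Int) := by
    simp [PySem.Str.len]
  simp only [find_separator, find_separator_alt]
  rw [pvStepA_eq_gstep, hfun, hcy, hlen, pv_main]
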